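-- pv_equiv track=rewrite | github.com/ludensg/panopticon | news_fetcher.py | _pick_category_for_topic
-- ===== SOURCE A (Python) =====
-- from typing import Optional
--
-- def _pick_category_for_topic(topic: str) -> Optional[str]:
--     """
--     Roughly map our topic label to a NewsAPI 'category' for fallback.
--     Categories allowed by NewsAPI include:
--       - business, entertainment, general, health, science, sports, technology
--     """
--     t = (topic or "").lower()
--     if any(k in t for k in ["space", "planet", "nasa", "astronomy"]):
--         return "science"
--     if any(k in t for k in ["game", "gaming", "console", "playstation", "xbox", "nintendo"]):
--         return "technology"
--     if any(k in t for k in ["robot", "ai", "coding", "computer"]):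
--         return "technology"
--     if any(k in t for k in ["animal", "nature", "environment", "climate"]):
--         return "science"
--     if any(k in t for k in ["health", "medicine", "fitness"]):
--         return "health"
--     # Fallback: general science-ish stuff
--     return "science"
-- ===== SOURCE B (Python) =====
-- from typing import Optional
--
-- # B: multi-pattern sliding-window scan — at each position of the text, look up
-- # each keyword-length window in a keyword set, collecting every keyword that
-- # occurs; then one lookup pass over the ordered table resolves precedence.
-- _TABLE = [
--     ("space", "science"), ("planet", "science"), ("nasa", "science"), ("astronomy", "science"),
--     ("game", "technology"), ("gaming", "technology"), ("console", "technology"),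
--     ("playstation", "technology"), ("xbox", "technology"), ("nintendo", "technology"),
--     ("robot", "technology"), ("ai", "technology"), ("coding", "technology"), ("computer", "technology"),
--     ("animal", "science"), ("nature", "science"), ("environment", "science"), ("climate", "science"),
--     ("health", "health"), ("medicine", "health"), ("fitness", "health"),
-- ]
-- _KEYWORDS = frozenset(kw for kw, _ in _TABLE)
-- _LENGTHS = sorted({len(kw) for kw in _KEYWORDS})
--
-- def _pick_category_for_topic(topic):
--     t = (topic or "").lower()
--     found = set()
--     for j in range(len(t)):
--         for L in _LENGTHS:
--             sub = t[j:j + L]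
--             if sub in _KEYWORDS:
--                 found.add(sub)
--     for kw, cat in _TABLE:
--         if kw in found:
--             return cat
--     return "science"
-- ===== Notes on version B (the rewrite author's own statement) =====
-- stated objective: alternative
-- what changed: Instead of testing each keyword against the text with repeated any()-substring scans, B slides over the text once, looking up each keyword-length window in a keyword set to collect all occurring keywords, then resolves precedence by one lookup pass over the ordered (keyword, category) table.
import Mathlib
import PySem

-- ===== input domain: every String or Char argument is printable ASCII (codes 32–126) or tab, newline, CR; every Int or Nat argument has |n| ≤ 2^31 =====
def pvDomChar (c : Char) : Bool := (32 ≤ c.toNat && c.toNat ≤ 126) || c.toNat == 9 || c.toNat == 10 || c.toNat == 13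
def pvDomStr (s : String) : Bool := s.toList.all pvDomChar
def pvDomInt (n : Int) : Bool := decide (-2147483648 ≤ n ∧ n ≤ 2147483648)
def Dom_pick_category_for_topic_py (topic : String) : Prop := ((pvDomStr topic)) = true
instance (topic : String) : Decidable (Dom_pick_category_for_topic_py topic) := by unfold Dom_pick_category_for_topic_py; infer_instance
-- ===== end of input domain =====

-- B replaces A's per-keyword any()-substring scans by a sliding-window scan of the text against a keyword set, then one precedence pass over the table (objective: alternative; same cost).


-- ===== PORT A =====
def pick_category_for_topic_py (topic : String) : Option String :=
  let t := PySem.Str.lower (if topic = "" then "" else topic)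
  if ["space", "planet", "nasa", "astronomy"].any (fun k => PySem.Str.isIn k t) then
    some "science"
  else if ["game", "gaming", "console", "playstation", "xbox", "nintendo"].any (fun k => PySem.Str.isIn k t) then
    some "technology"
  else if ["robot", "ai", "coding", "computer"].any (fun k => PySem.Str.isIn k t) then
    some "technology"
  else if ["animal", "nature", "environment", "climate"].any (fun k => PySem.Str.isIn k t) then
    some "science"
  else if ["health", "medicine", "fitness"].any (fun k => PySem.Str.isIn k t) then
    some "health"
  else
    some "science"

-- ===== PORT B =====
def pvTable : List (String × String) :=
  [("space", "science"), ("planet", "science"), ("nasa", "science"), ("astronomy", "science"),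
   ("game", "technology"), ("gaming", "technology"), ("console", "technology"),
   ("playstation", "technology"), ("xbox", "technology"), ("nintendo", "technology"),
   ("robot", "technology"), ("ai", "technology"), ("coding", "technology"), ("computer", "technology"),
   ("animal", "science"), ("nature", "science"), ("environment", "science"), ("climate", "science"),
   ("health", "health"), ("medicine", "health"), ("fitness", "health")]

def pvKeywords : PySem.Set String := PySem.Set.ofList (pvTable.map Prod.fst)

def pvLengths : List Int :=
  PySem.List.sorted (PySem.Set.ofList (pvKeywords.map (fun kw => (PySem.Str.len kw : Int)))) (fun x => x) false

-- the set of keywords occurring in t, collected by the sliding-window scan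
def pvFound (t : String) : PySem.Set String :=
  (List.range (PySem.Str.len t).toNat).foldl (fun found j =>
    pvLengths.foldl (fun found L =>
      let sub := PySem.Str.slice t (some (j : Int)) (some ((j : Int) + L))
      if PySem.Set.contains pvKeywords sub then PySem.Set.add found sub else found) found)
    PySem.Set.empty

-- precedence pass: first table entry whose keyword was found
def pvResolve (found : PySem.Set String) : List (String × String) → String
  | [] => "science"
  | (kw, cat) :: rest => if PySem.Set.contains found kw then cat else pvResolve found rest

def pick_category_for_topic_py_alt (topic : String) : Option String :=
  let t := PySem.Str.lower (if topic = "" then "" else topic)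
  some (pvResolve (pvFound t) pvTable)

-- ===== PRECONDITION & SPEC =====
def Spec_pick_category_for_topic_py (topic : String) (out : Option String) : Prop := out = pick_category_for_topic_py_alt topic
instance (topic : String) (out : Option String) : Decidable (Spec_pick_category_for_topic_py topic out) := by unfold Spec_pick_category_for_topic_py; infer_instance

-- ===== CLAIM =====
def Claim_equal_pick_category_for_topic_py : Prop := ∀ (topic : String), Dom_pick_category_for_topic_py topic → Spec_pick_category_for_topic_py topic (pick_category_for_topic_py topic)

-- ===== LEMMAS AND PROOFS =====

-- membership in a fold that conditionally adds one element per step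
lemma mem_foldl_step {α : Type} (F : PySem.Set String → α → PySem.Set String) (P : α → Prop)
    (x : String) (h : ∀ s j, x ∈ F s j ↔ x ∈ s ∨ P j) :
    ∀ (l : List α) (s : PySem.Set String), x ∈ l.foldl F s ↔ x ∈ s ∨ ∃ j ∈ l, P j := by
  intro l
  induction l with
  | nil => simp
  | cons a l ih =>
    intro s
    simp only [List.foldl_cons, ih, h, List.mem_cons]
    constructor
    · rintro ((hx | hp) | ⟨j, hj, hp⟩)
      · exact Or.inl hx
      · exact Or.inr ⟨a, Or.inl rfl, hp⟩
      · exact Or.inr ⟨j, Or.inr hj, hp⟩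
    · rintro (hx | ⟨j, (rfl | hj), hp⟩)
      · exact Or.inl (Or.inl hx)
      · exact Or.inl (Or.inr hp)
      · exact Or.inr ⟨j, hj, hp⟩

lemma mem_pvFound (t : String) (x : String) :
    x ∈ pvFound t ↔ ∃ j ∈ List.range (PySem.Str.len t).toNat, ∃ L ∈ pvLengths,
      PySem.Str.slice t (some (j : Int)) (some ((j : Int) + L)) = x ∧
      PySem.Set.contains pvKeywords x = true := by
  unfold pvFound
  rw [mem_foldl_step _ (fun j => ∃ L ∈ pvLengths,
        PySem.Str.slice t (some (j : Int)) (some ((j : Int) + L)) = x ∧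
        PySem.Set.contains pvKeywords x = true)]
  · simp [PySem.Set.empty]
  · intro s j
    rw [mem_foldl_step _ (fun L =>
          PySem.Str.slice t (some (j : Int)) (some ((j : Int) + L)) = x ∧
          PySem.Set.contains pvKeywords x = true)]
    intro s' L
    by_cases hc : PySem.Set.contains pvKeywords
        (PySem.Str.slice t (some (j : Int)) (some ((j : Int) + L))) = true
    · simp only [hc, if_pos, PySem.Set.mem_add]
      constructor
      · rintro (hs | rfl)
        · exact Or.inl hs
        · exact Or.inr ⟨rfl, hc⟩
      · rintro (hs | ⟨rfl, _⟩)
        · exact Or.inl hs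
        · exact Or.inr rfl
    · simp only [if_neg hc]
      constructor
      · exact Or.inl
      · rintro (hs | ⟨rfl, hk⟩)
        · exact hs
        · exact absurd hk hc

-- a keyword of a table length is collected iff it occurs in t as a substring
lemma found_iff_isIn (t kw : String)
    (hne : kw.toList ≠ []) (hL : ((kw.toList.length : Int)) ∈ pvLengths)
    (hkw : kw ∈ pvKeywords) :
    PySem.Set.contains (pvFound t) kw = true ↔ PySem.Str.isIn kw t = true := by
  rw [PySem.Set.contains_iff, mem_pvFound]
  have hIn : PySem.Str.isIn kw t = true ↔ ∃ j, kw.toList <+: t.toList.drop j := by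
    rw [show PySem.Str.isIn kw t = PySem.Chars.isIn kw.toList t.toList from rfl,
        ← PySem.Chars.exists_prefix_drop_iff_isIn]
  rw [hIn]
  constructor
  · rintro ⟨j, hj, L, hLmem, hslice, -⟩
    -- the matched window is a prefix of t.toList.drop j
    have h0 : 0 ≤ L := by
      have : ∀ M ∈ pvLengths, 0 ≤ M := by decide
      exact this L hLmem
    refine ⟨j, ?_⟩
    have : kw.toList = (t.toList.drop j).take L.toNat := by
      have := congrArg String.toList hslice
      simpa [PySem.Str.toList_slice, PySem.Chars.slice_eq_listSlice,
             PySem.List.slice_toNat _ (by positivity : (0:Int) ≤ (j:Int)) (by omega : (0:Int) ≤ (j:Int) + L),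
             Int.toNat_add (by positivity : (0:Int) ≤ (j:Int)) h0] using this.symm
    rw [this]
    exact List.take_prefix _ _
  · rintro ⟨j, hpre⟩
    have hjlt : j < t.toList.length := by
      by_contra h
      rw [not_lt] at h
      rw [List.drop_eq_nil_of_le h] at hpre
      exact hne (List.prefix_nil.mp hpre)
    refine ⟨j, ?_, (kw.toList.length : Int), hL, ?_, (PySem.Set.contains_iff _ _).mpr hkw⟩
    · apply List.mem_range.mpr
      simpa [PySem.Str.len] using hjlt
    · apply String.toList_inj.mp
      rw [PySem.Str.toList_slice, PySem.Chars.slice_eq_listSlice, PySem.List.slice_natCast_add]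
      exact (List.prefix_iff_eq_take.mp hpre).symm

-- first-match scan with the plain substring test (proof-only bridge form)
def pvScan (t : String) : List (String × String) → String
  | [] => "science"
  | (kw, cat) :: rest => if PySem.Str.isIn kw t then cat else pvScan t rest

lemma pvResolve_congr (t : String) (found : PySem.Set String) :
    ∀ table : List (String × String),
      (∀ p ∈ table, PySem.Set.contains found p.1 = PySem.Str.isIn p.1 t) →
      pvResolve found table = pvScan t table := by
  intro table
  induction table with
  | nil => intro _; rfl
  | cons p rest ih =>
    intro h
    obtain ⟨kw, cat⟩ := p
    simp only [pvResolve, pvScan, h (kw, cat) (List.mem_cons_self ..)]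
    split_ifs with hc
    · rfl
    · exact ih (fun q hq => h q (List.mem_cons_of_mem _ hq))

lemma pvScan_group (t c : String) (ks : List String) (rest : List (String × String)) :
    pvScan t (ks.map (fun k => (k, c)) ++ rest)
      = if ks.any (fun k => PySem.Str.isIn k t) then c else pvScan t rest := by
  induction ks with
  | nil => simp
  | cons k ks ih =>
    simp only [List.map_cons, List.cons_append, pvScan, List.any_cons, Bool.or_eq_true]
    rw [ih]
    split_ifs <;> tauto

lemma pvTable_groups : pvTable =
    (["space", "planet", "nasa", "astronomy"].map (fun k => (k, "science")))
    ++ ((["game", "gaming", "console", "playstation", "xbox", "nintendo"].map (fun k => (k, "technology")))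
    ++ ((["robot", "ai", "coding", "computer"].map (fun k => (k, "technology")))
    ++ ((["animal", "nature", "environment", "climate"].map (fun k => (k, "science")))
    ++ ((["health", "medicine", "fitness"].map (fun k => (k, "health")))
    ++ ([] : List (String × String)))))) := by
  rfl

lemma resolve_eq_scan (t : String) : pvResolve (pvFound t) pvTable = pvScan t pvTable := by
  apply pvResolve_congr
  intro p hp
  have hfacts : p.1.toList ≠ [] ∧ ((p.1.toList.length : Int)) ∈ pvLengths ∧ p.1 ∈ pvKeywords := by
    fin_cases hp <;> exact ⟨by decide, by decide, by decide⟩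
  have hiff := found_iff_isIn t p.1 hfacts.1 hfacts.2.1 hfacts.2.2
  cases h : PySem.Str.isIn p.1 t with
  | true => exact hiff.mpr h
  | false =>
    cases hc : PySem.Set.contains (pvFound t) p.1 with
    | true => rw [hiff.mp hc] at h; exact absurd h (by simp)
    | false => rfl

-- ===== VERDICT =====
theorem pick_category_for_topic_py_spec : Claim_equal_pick_category_for_topic_py := by
  intro topic _
  unfold Spec_pick_category_for_topic_py
  simp only [pick_category_for_topic_py, pick_category_for_topic_py_alt]
  generalize PySem.Str.lower (if topic = "" then "" else topic) = t
  rw [resolve_eq_scan, pvTable_groups]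
  simp only [pvScan_group, pvScan]
  split_ifs <;> rfl
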